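-- pv_equiv track=rewrite | github.com/casconalio/Heureka | Inference_Engine/Inference_Engine.py | split_rule
-- ===== SOURCE A (Python) =====
-- import copy
--
-- def split_rule(line):
--     result = []
--     required = []
--     line=line.split() #splits line into list of only it's words
--
--     line_required = copy.deepcopy(line) #need to be able to pop already visited words
--     for word in line:
--         if word == "if":
--             line_required.pop(0)
--             break
--         result.append(word)
--         line_required.pop(0)
--     for word in line_required:
--         required.append(word)
--     return [result, required]
-- ===== SOURCE B (Python) =====
-- def split_rule(line):
--     words = line.split()
--     if "if" in words:
--         i = words.index("if")
--         return [words[:i], words[i + 1:]]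
--     return [words, []]
-- ===== Notes on version B (the rewrite author's own statement) =====
-- stated objective: simpler
-- what changed: Replaces A's deepcopy-and-pop-from-front scan with two accumulators by locating the keyword's first index once and returning two slices; no per-element appending or popping.
import Mathlib
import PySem

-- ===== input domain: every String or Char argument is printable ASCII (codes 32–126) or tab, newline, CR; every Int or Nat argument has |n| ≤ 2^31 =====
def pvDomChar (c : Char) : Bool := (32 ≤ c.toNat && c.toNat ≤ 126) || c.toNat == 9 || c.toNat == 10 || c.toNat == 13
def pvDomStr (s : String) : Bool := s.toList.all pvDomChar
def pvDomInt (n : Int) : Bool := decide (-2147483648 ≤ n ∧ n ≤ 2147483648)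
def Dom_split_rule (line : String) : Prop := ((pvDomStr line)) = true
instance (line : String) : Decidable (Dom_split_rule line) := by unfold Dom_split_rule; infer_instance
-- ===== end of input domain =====

-- B replaces A's scan-with-two-accumulators-and-pop(0) by one index lookup and two slices (simpler).

-- ===== PORT A =====
-- the for-loop over `line` with `result`/`line_required` state; break on "if" (pop(0) = tail)
def splitRuleLoop (words : List String) (result lineRequired : List String) :
    List String × List String :=
  match words with
  | [] => (result, lineRequired)
  | w :: rest =>
    if w == "if" then (result, lineRequired.tail)
    else splitRuleLoop rest (result ++ [w]) lineRequired.tail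

def split_rule (line : String) : List (List String) :=
  let ws := PySem.Str.split₀ line
  let p := splitRuleLoop ws [] ws
  let required := p.2.foldl (fun acc w => acc ++ [w]) []
  [p.1, required]

-- ===== PORT B =====
def split_rule_alt (line : String) : List (List String) :=
  let words := PySem.Str.split₀ line
  match PySem.List.index? words "if" with
  | some i => [words.take i, words.drop (i + 1)]
  | none => [words, []]

-- ===== PRECONDITION & SPEC =====
def Spec_split_rule (line : String) (out : List (List String)) : Prop := out = split_rule_alt line
instance (line : String) (out : List (List String)) : Decidable (Spec_split_rule line out) := by unfold Spec_split_rule; infer_instance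

-- ===== CLAIM (what is proved, stated in full; the proofs are below) =====
def Claim_equal_split_rule : Prop := ∀ (line : String), Dom_split_rule line → Spec_split_rule line (split_rule line)

-- ===== LEMMAS AND PROOFS =====
theorem foldl_append_id (l : List String) (acc : List String) :
    l.foldl (fun acc w => acc ++ [w]) acc = acc ++ l := by
  induction l generalizing acc with
  | nil => simp
  | cons w rest ih => simp [List.foldl, ih, List.append_assoc]

theorem splitRuleLoop_eq (words : List String) (res lr : List String)
    (h : words.length = lr.length) :
    splitRuleLoop words res lr =
      match PySem.List.index? words "if" with
      | some i => (res ++ words.take i, lr.drop (i + 1))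
      | none => (res ++ words, lr.drop words.length) := by
  induction words generalizing res lr with
  | nil => simp [splitRuleLoop, PySem.List.index?]
  | cons w rest ih =>
    cases lr with
    | nil => simp at h
    | cons x xs =>
      simp only [List.length_cons, Nat.succ.injEq] at h
      by_cases hw : w = "if"
      · subst hw
        rw [PySem.List.index?_cons_self]
        simp [splitRuleLoop]
      · have : (w == "if") = false := by simp [hw]
        rw [PySem.List.index?_cons_of_ne rest hw]
        simp only [splitRuleLoop, this, Bool.false_eq_true, if_false, List.tail_cons]
        rw [ih (res ++ [w]) xs h]
        cases PySem.List.index? rest "if" with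
        | none => simp [List.append_assoc]
        | some i => simp [List.append_assoc]

-- ===== VERDICT (by name: the statement is the Claim_ definition above) =====
theorem split_rule_spec : Claim_equal_split_rule := by
  intro line _
  unfold Spec_split_rule split_rule split_rule_alt
  simp only
  rw [splitRuleLoop_eq _ _ _ rfl, foldl_append_id]
  cases h : PySem.List.index? (PySem.Str.split₀ line) "if" with
  | none => simp [List.drop_length]
  | some i => simp
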